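-- pv_equiv track=rewrite | github.com/Karakean/Systems-of-Linear-Equations | main.py | create_system_matrix
-- ===== SOURCE A (Python) =====
-- def create_system_matrix(N, a1, a2, a3):
--     A = [[0 for _ in range(N)] for _ in range(N)]
--     for i in range(N):
--         A[i][i] = a1
--         if i+1 < N:
--             A[i][i + 1] = a2
--             A[i+1][i] = a2
--         if i+2 < N:
--             A[i][i+2] = a3
--             A[i+2][i] = a3
--     return A
-- ===== SOURCE B (Python) =====
-- def create_system_matrix(N, a1, a2, a3):
--     def cell(d):
--         return a1 if d == 0 else a2 if d == 1 else a3 if d == 2 else 0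
--     return [[cell(abs(i - j)) for j in range(N)] for i in range(N)]
-- ===== Notes on version B (the rewrite author's own statement) =====
-- stated objective: simpler
-- what changed: Replaces zero-initialize-then-scatter band writes with one direct comprehension that computes every cell as a pure function of the distance abs(i-j).
import Mathlib
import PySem

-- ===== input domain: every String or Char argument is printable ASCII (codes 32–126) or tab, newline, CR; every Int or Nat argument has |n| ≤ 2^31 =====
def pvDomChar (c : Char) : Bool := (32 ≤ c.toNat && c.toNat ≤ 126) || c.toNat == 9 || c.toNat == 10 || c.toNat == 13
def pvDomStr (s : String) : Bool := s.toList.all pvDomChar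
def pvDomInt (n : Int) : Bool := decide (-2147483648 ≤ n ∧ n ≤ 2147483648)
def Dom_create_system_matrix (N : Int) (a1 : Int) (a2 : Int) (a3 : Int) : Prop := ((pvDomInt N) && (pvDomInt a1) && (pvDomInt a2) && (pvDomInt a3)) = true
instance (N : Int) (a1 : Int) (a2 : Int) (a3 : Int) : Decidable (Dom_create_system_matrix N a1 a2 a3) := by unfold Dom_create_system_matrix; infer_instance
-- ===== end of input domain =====

-- B builds each cell directly from the band distance |i-j| in one comprehension,
-- instead of A's zero matrix mutated by scattering the three bands (objective: simpler).

-- ===== PORT A =====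
-- loop body of A's 'for i in range(N)': in-place writes A[r][c] = v become List.modify r (·.set c v)
def pvBodyA (N a1 a2 a3 : Int) (A : List (List Int)) (i : Int) : List (List Int) :=
  let A1 := A.modify i.toNat (fun r => r.set i.toNat a1)
  let A2 := if i + 1 < N then
      (A1.modify i.toNat (fun r => r.set (i+1).toNat a2)).modify (i+1).toNat
        (fun r => r.set i.toNat a2)
    else A1
  if i + 2 < N then
      (A2.modify i.toNat (fun r => r.set (i+2).toNat a3)).modify (i+2).toNat
        (fun r => r.set i.toNat a3)
  else A2

def create_system_matrix (N : Int) (a1 : Int) (a2 : Int) (a3 : Int) : List (List Int) :=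
  (PySem.List.pyRange 0 N 1).foldl (pvBodyA N a1 a2 a3)
    ((PySem.List.pyRange 0 N 1).map (fun _ => (PySem.List.pyRange 0 N 1).map (fun _ => (0:Int))))

-- ===== PORT B =====
-- cell(d): a1 if d == 0 else a2 if d == 1 else a3 if d == 2 else 0
def pvCell (a1 a2 a3 : Int) (d : Nat) : Int :=
  if d = 0 then a1 else if d = 1 then a2 else if d = 2 then a3 else 0

def create_system_matrix_alt (N : Int) (a1 : Int) (a2 : Int) (a3 : Int) : List (List Int) :=
  (PySem.List.pyRange 0 N 1).map (fun i =>
    (PySem.List.pyRange 0 N 1).map (fun j => pvCell a1 a2 a3 (i - j).natAbs))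

-- ===== PRECONDITION & SPEC =====
def Spec_create_system_matrix (N : Int) (a1 : Int) (a2 : Int) (a3 : Int) (out : List (List Int)) : Prop := out = create_system_matrix_alt N a1 a2 a3
instance (N : Int) (a1 : Int) (a2 : Int) (a3 : Int) (out : List (List Int)) : Decidable (Spec_create_system_matrix N a1 a2 a3 out) := by unfold Spec_create_system_matrix; infer_instance

-- ===== CLAIM (what is proved, stated in full; the proofs are below) =====
def Claim_equal_create_system_matrix : Prop := ∀ (N : Int) (a1 : Int) (a2 : Int) (a3 : Int), Dom_create_system_matrix N a1 a2 a3 → Spec_create_system_matrix N a1 a2 a3 (create_system_matrix N a1 a2 a3)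

-- ===== LEMMAS AND PROOFS =====

-- square matrix of size n with entry function g
def pvMk (n : Nat) (g : Nat → Nat → Int) : List (List Int) :=
  (List.range n).map (fun i => (List.range n).map (g i))

-- entry function after the first k iterations of A's loop
def pvEnt (a1 a2 a3 : Int) (k i j : Nat) : Int :=
  if min i j < k then pvCell a1 a2 a3 ((i : Int) - (j : Int)).natAbs else 0

lemma pvMk_congr {n : Nat} {g g' : Nat → Nat → Int}
    (h : ∀ i j, i < n → j < n → g i j = g' i j) : pvMk n g = pvMk n g' := by
  unfold pvMk
  apply List.map_congr_left
  intro i hi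
  apply List.map_congr_left
  intro j hj
  exact h i j (List.mem_range.mp hi) (List.mem_range.mp hj)

-- writing v into cell (i, j) of pvMk n g
lemma pvMk_write (n i j : Nat) (v : Int) (g : Nat → Nat → Int) :
    (pvMk n g).modify i (fun r => r.set j v)
      = pvMk n (fun x y => if x = i ∧ y = j then v else g x y) := by
  unfold pvMk
  apply List.ext_getElem
  · simp
  · intro p h1 h2
    rw [List.getElem_modify]
    simp only [List.getElem_map, List.getElem_range]
    by_cases hp : i = p
    · rw [if_pos hp]
      subst hp
      apply List.ext_getElem
      · simp
      · intro q hq1 hq2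
        rw [List.getElem_set]
        simp only [List.getElem_map, List.getElem_range]
        by_cases hq : j = q
        · subst hq
          simp
        · rw [if_neg hq, if_neg (fun h => hq h.2.symm)]
    · rw [if_neg hp]
      apply List.map_congr_left
      intro y _
      have hne : ¬ (p = i ∧ y = j) := fun h => hp h.1.symm
      rw [if_neg hne]

set_option maxHeartbeats 1000000 in
lemma pvBodyA_step (N a1 a2 a3 : Int) (k : Nat) (hk : k < N.toNat) :
    pvBodyA N a1 a2 a3 (pvMk N.toNat (pvEnt a1 a2 a3 k)) (k : Int)
      = pvMk N.toNat (pvEnt a1 a2 a3 (k + 1)) := by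
  have hN : 0 < N := by omega
  have h1 : ((k : Int)).toNat = k := by omega
  have h2 : ((k : Int) + 1).toNat = k + 1 := by omega
  have h3 : ((k : Int) + 2).toNat = k + 2 := by omega
  have hc1 : ((k : Int) + 1 < N) ↔ (k + 1 < N.toNat) := by omega
  have hc2 : ((k : Int) + 2 < N) ↔ (k + 2 < N.toNat) := by omega
  unfold pvBodyA
  simp only [h1, h2, h3, pvMk_write]
  by_cases c1 : k + 1 < N.toNat
  · rw [if_pos (hc1.mpr c1)]
    simp only [pvMk_write]
    by_cases c2 : k + 2 < N.toNat
    · rw [if_pos (hc2.mpr c2)]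
      apply pvMk_congr
      intro i j hi hj
      unfold pvEnt pvCell
      split_ifs <;> omega
    · rw [if_neg (by omega)]
      apply pvMk_congr
      intro i j hi hj
      unfold pvEnt pvCell
      split_ifs <;> omega
  · rw [if_neg (by omega), if_neg (by omega)]
    apply pvMk_congr
    intro i j hi hj
    unfold pvEnt pvCell
    split_ifs <;> omega

lemma pvLoop_inv (N a1 a2 a3 : Int) (k : Nat) (hk : k ≤ N.toNat) :
    (List.range k).foldl (fun A (i : Nat) => pvBodyA N a1 a2 a3 A (i : Int))
        (pvMk N.toNat (fun _ _ => 0))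
      = pvMk N.toNat (pvEnt a1 a2 a3 k) := by
  induction k with
  | zero =>
    simp only [List.range_zero, List.foldl_nil]
    apply pvMk_congr
    intro i j _ _
    unfold pvEnt
    simp
  | succ m ih =>
    rw [List.range_succ, List.foldl_append, ih (by omega), List.foldl_cons, List.foldl_nil,
      pvBodyA_step N a1 a2 a3 m (by omega)]

theorem pv_main (N a1 a2 a3 : Int) :
    create_system_matrix N a1 a2 a3 = create_system_matrix_alt N a1 a2 a3 := by
  unfold create_system_matrix create_system_matrix_alt
  rw [PySem.List.pyRange_one]
  simp only [Int.sub_zero, List.map_map, List.foldl_map, Function.comp_def, zero_add]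
  have hinit : ((List.range N.toNat).map
      (fun _ : Nat => (List.range N.toNat).map (fun _ : Nat => (0:Int))))
      = pvMk N.toNat (fun _ _ => 0) := rfl
  rw [hinit, pvLoop_inv N a1 a2 a3 N.toNat le_rfl]
  unfold pvMk
  apply List.map_congr_left
  intro i hi
  apply List.map_congr_left
  intro j hj
  have hi' := List.mem_range.mp hi
  have hj' := List.mem_range.mp hj
  unfold pvEnt
  rw [if_pos (by omega)]

-- ===== VERDICT (by name: the statement is the Claim_ definition above) =====
theorem create_system_matrix_spec : Claim_equal_create_system_matrix := by
  intro N a1 a2 a3 _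
  unfold Spec_create_system_matrix
  exact pv_main N a1 a2 a3
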